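-- pv_equiv track=rewrite | github.com/junqiang-Yang/wii | fightlord.py | checksidaidui
-- ===== SOURCE A (Python) =====
-- Card = ('R','B','2','A','K','Q','J','T','9','8','7','6','5','4','3')#R=大王，B=小王，T=10
--
-- def dispcardbyorder(stringF):
--     stringS = list(stringF)
--     i = len(stringF) - 1
--     while i > 0:
--         for j in range(0, i):
--             if Card.index(stringS[j]) < Card.index(stringS[j + 1]):
--             #if stringF.count(stringS[j]) < stringF.count(stringS[j+1]):
--                 temp = stringS[j]
--                 stringS[j] = stringS[j + 1]
--                 stringS[j + 1] = temp
--         i = i - 1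
--     i = len(stringF) - 1
--     while i > 0:
--         for j in range(0, i):
--             #if Card.index(stringS[j]) < Card.index(stringS[j + 1]):
--              if stringF.count(stringS[j]) < stringF.count(stringS[j+1]):
--                 temp = stringS[j]
--                 stringS[j] = stringS[j + 1]
--                 stringS[j + 1] = temp
--         i = i - 1
--     return ''.join(stringS)
--
-- def checksidaidui(stringF):
--     if len(stringF) != 8:
--         return 0
--     stringF = dispcardbyorder(stringF)
--     if stringF.count(stringF[0]) != 4:
--         return 0
--     for i in range(4,len(stringF)):
--         if stringF.count(stringF[i]) !=2:
--             return 0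
--     return 9
-- ===== SOURCE B (Python) =====
-- Card = ('R','B','2','A','K','Q','J','T','9','8','7','6','5','4','3')
--
-- def checksidaidui(stringF):
--     if len(stringF) != 8:
--         return 0
--     freq = {}
--     for c in stringF:
--         freq[c] = freq.get(c, 0) + 1
--     return 9 if sorted(freq.values()) == [2, 2, 4] else 0
-- ===== Notes on version B (the rewrite author's own statement) =====
-- stated objective: simpler
-- what changed: Replaced the double hand-written bubble sort plus repeated .count scans with a single counting pass into a dict and a check that the sorted count signature is [2,2,4].
import Mathlib
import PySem

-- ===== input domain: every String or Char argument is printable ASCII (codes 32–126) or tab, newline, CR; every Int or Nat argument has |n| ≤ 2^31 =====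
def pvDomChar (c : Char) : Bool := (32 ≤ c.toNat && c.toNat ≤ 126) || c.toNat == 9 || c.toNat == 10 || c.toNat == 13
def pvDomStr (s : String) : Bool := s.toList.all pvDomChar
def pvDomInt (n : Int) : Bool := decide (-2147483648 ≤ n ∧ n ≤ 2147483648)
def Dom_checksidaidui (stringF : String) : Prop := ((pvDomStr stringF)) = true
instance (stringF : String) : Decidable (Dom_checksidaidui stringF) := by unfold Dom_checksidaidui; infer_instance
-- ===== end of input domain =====

-- B replaces A's two hand-written bubble sorts plus repeated .count scans by one counting
-- pass into a dict and a check that the sorted count signature is [2,2,4] (objective: simpler).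

-- ===== PORT A =====

def pvCard : List Char := ['R','B','2','A','K','Q','J','T','9','8','7','6','5','4','3']

-- Card.index(c); the ValueError case (c not in Card) is excluded by Pre_checksidaidui
def pvIdx (c : Char) : Int := ((PySem.List.index? pvCard c).getD 0 : Nat)

-- stringF.count(c) for a single character c equals the character count (exact here)
def pvCnt (l : List Char) (c : Char) : Int := (l.count c : Int)

-- the inner `for j in range(0, i)` adjacent compare-and-swap pass, as structural recursion
def pvPass (key : Char → Int) : List Char → List Char
  | a :: b :: l => if key a < key b then b :: pvPass key (a :: l) else a :: pvPass key (b :: l)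
  | l => l

-- one outer-loop iteration at bound i: the pass touches exactly indices 0..i
def pvPassAt (key : Char → Int) (i : Nat) (l : List Char) : List Char :=
  pvPass key (l.take (i + 1)) ++ l.drop (i + 1)

-- `i = len(stringF) - 1; while i > 0: <pass at i>; i = i - 1`
def pvBubble (key : Char → Int) : Nat → List Char → List Char
  | 0, l => l
  | i + 1, l => pvBubble key i (pvPassAt key (i + 1) l)

-- dispcardbyorder: first bubble sort by Card.index, second by count in the input string
def pvDispL (l : List Char) : List Char :=
  pvBubble (fun c => pvCnt l c) (l.length - 1) (pvBubble pvIdx (l.length - 1) l)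

-- `for i in range(4, len(stringF)): if stringF.count(stringF[i]) != 2: return 0` / `return 9`
def pvChkLoop (t : List Char) : List Int → Int
  | [] => 9
  | i :: rest => if pvCnt t (PySem.List.pyGetD t i ' ') ≠ 2 then 0 else pvChkLoop t rest

def checksidaidui (stringF : String) : Int :=
  let s := stringF.toList
  if s.length ≠ 8 then 0
  else
    let t := pvDispL s
    if pvCnt t (PySem.List.pyGetD t 0 ' ') ≠ 4 then 0
    else pvChkLoop t (PySem.List.pyRange 4 (t.length : Int) 1)

-- ===== PORT B =====

def checksidaidui_alt (stringF : String) : Int :=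
  let s := stringF.toList
  if s.length ≠ 8 then 0
  else
    -- freq = {}; for c in stringF: freq[c] = freq.get(c, 0) + 1
    let freq := s.foldl (fun d c => d.modify c 0 (· + 1)) (PySem.Dict.empty : PySem.Dict Char Int)
    if PySem.List.sorted freq.values (fun v => v) false = [2, 2, 4] then 9 else 0

-- ===== PRECONDITION & SPEC =====

-- Pre_ excludes exactly the inputs where A raises ValueError: an 8-character hand containing
-- a character outside Card (Card.index raises during A's first bubble sort).
def Pre_checksidaidui (stringF : String) : Prop :=
  stringF.toList.length = 8 → ∀ c ∈ stringF.toList, c ∈ pvCard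
instance (stringF : String) : Decidable (Pre_checksidaidui stringF) := by
  unfold Pre_checksidaidui; infer_instance

def pvWitness_checksidaidui : String := ""

def Spec_checksidaidui (stringF : String) (out : Int) : Prop := out = checksidaidui_alt stringF
instance (stringF : String) (out : Int) : Decidable (Spec_checksidaidui stringF out) := by
  unfold Spec_checksidaidui; infer_instance

-- ===== CLAIM (what is proved, stated in full; the proofs are below) =====
def Claim_equal_checksidaidui : Prop := ∀ (stringF : String), Dom_checksidaidui stringF → Pre_checksidaidui stringF → Spec_checksidaidui stringF (checksidaidui stringF)

-- ===== LEMMAS AND PROOFS =====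

theorem pvPass_perm (key : Char → Int) : ∀ l : List Char, (pvPass key l).Perm l := by
  intro l
  fun_induction pvPass key l with
  | case1 a b l h ih => exact ((ih.cons b).trans (List.Perm.swap a b l))
  | case2 a b l h ih => exact ih.cons a
  | case3 l h => exact List.Perm.refl l

theorem pvPass_split (key : Char → Int) :
    ∀ l : List Char, l ≠ [] →
      ∃ ys m, pvPass key l = ys ++ [m] ∧ ∀ x ∈ l, key m ≤ key x := by
  intro l
  fun_induction pvPass key l with
  | case1 a b l h ih =>
      intro _
      obtain ⟨ys, m, heq, hmin⟩ := ih (by simp)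
      refine ⟨b :: ys, m, by simp [heq], ?_⟩
      intro x hx
      rcases List.mem_cons.1 hx with rfl | hx
      · exact hmin x (by simp)
      · rcases List.mem_cons.1 hx with rfl | hx
        · exact le_of_lt (lt_of_le_of_lt (hmin a (by simp)) h)
        · exact hmin x (by simp [hx])
  | case2 a b l h ih =>
      intro _
      obtain ⟨ys, m, heq, hmin⟩ := ih (by simp)
      refine ⟨a :: ys, m, by simp [heq], ?_⟩
      intro x hx
      rcases List.mem_cons.1 hx with rfl | hx
      · exact le_trans (hmin b (by simp)) (not_lt.1 h)
      · exact hmin x hx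
  | case3 l h =>
      intro hne
      match l, hne with
      | [a], _ => exact ⟨[], a, rfl, by intro x hx; simp at hx; simp [hx]⟩
      | a :: b :: r, _ => exact absurd rfl (h a b r)



theorem pvPassAt_perm (key : Char → Int) (i : Nat) (l : List Char) :
    (pvPassAt key i l).Perm l := by
  calc (pvPassAt key i l).Perm (l.take (i+1) ++ l.drop (i+1)) :=
        (pvPass_perm key _).append_right _
    _ = l := List.take_append_drop _ _
  -- fallback if calc syntax wrong

theorem pvBubble_perm (key : Char → Int) : ∀ (i : Nat) (l : List Char), (pvBubble key i l).Perm l := by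
  intro i
  induction i with
  | zero => intro l; exact List.Perm.refl l
  | succ n ih => intro l; exact (ih _).trans (pvPassAt_perm key (n+1) l)

def pvGood (key : Char → Int) (i : Nat) (l : List Char) : Prop :=
  (∀ x ∈ l.take i, ∀ y ∈ l.drop i, key y ≤ key x) ∧
    (l.drop i).Pairwise (fun a b => key b ≤ key a)

theorem pvPassAt_good (key : Char → Int) (i : Nat) (l : List Char)
    (h : pvGood key (i + 2) l) : pvGood key (i + 1) (pvPassAt key (i + 1) l) := by
  obtain ⟨h1, h2⟩ := h
  rcases eq_or_ne l [] with rfl | hne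
  · constructor <;> simp [pvPassAt, pvPass]
  have hl1 : l.take (i + 2) ≠ [] := by
    simp [List.take_eq_nil_iff, hne]
  obtain ⟨ys, m, heq, hmin⟩ := pvPass_split key (l.take (i + 2)) hl1
  have hplen : (pvPass key (l.take (i+2))).length = (l.take (i+2)).length :=
    (pvPass_perm key _).length_eq
  have hmem : ∀ x ∈ pvPass key (l.take (i+2)), x ∈ l.take (i+2) :=
    fun x hx => (pvPass_perm key _).mem_iff.1 hx
  by_cases hlen : l.length ≤ i + 1
  · -- the suffix drop (i+1) of the result is empty: Good holds trivially
    have hr : (pvPassAt key (i+1) l).length ≤ i + 1 := by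
      have := (pvPassAt_perm key (i+1) l).length_eq
      omega
    constructor
    · intro x hx y hy
      rw [List.drop_eq_nil_of_le hr] at hy
      simp at hy
    · rw [List.drop_eq_nil_of_le hr]; exact List.Pairwise.nil
  · push Not at hlen
    have htl : (l.take (i + 2)).length = i + 2 := by
      rw [List.length_take]; omega
    have hyslen : ys.length = i + 1 := by
      rw [heq] at hplen; simp at hplen; omega
    have hr : pvPassAt key (i+1) l = ys ++ (m :: l.drop (i+2)) := by
      simp [pvPassAt, heq]
    have htake : (pvPassAt key (i+1) l).take (i+1) = ys := by
      rw [hr, List.take_append_of_le_length (by omega), List.take_of_length_le (by omega)]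
    have hdrop : (pvPassAt key (i+1) l).drop (i+1) = m :: l.drop (i+2) := by
      rw [hr, List.drop_append_of_le_length (by omega), List.drop_of_length_le (by omega)]
      simp
    have hmtake : m ∈ l.take (i+2) := by
      have : m ∈ pvPass key (l.take (i+2)) := by rw [heq]; simp
      exact hmem m this
    constructor
    · intro x hx y hy
      rw [htake] at hx
      rw [hdrop] at hy
      have hxmem : x ∈ l.take (i + 2) := hmem x (by rw [heq]; simp [hx])
      rcases List.mem_cons.1 hy with rfl | hy
      · exact hmin x hxmem
      · exact h1 x hxmem y hy
    · rw [hdrop]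
      exact List.Pairwise.cons (fun y hy => h1 m hmtake y hy) h2

theorem pvBubble_sorted (key : Char → Int) :
    ∀ (i : Nat) (l : List Char), pvGood key (i + 1) l →
      (pvBubble key i l).Pairwise (fun a b => key b ≤ key a) := by
  intro i
  induction i with
  | zero =>
      intro l h
      obtain ⟨h1, h2⟩ := h
      show l.Pairwise _
      rcases l with _ | ⟨a, t⟩
      · exact List.Pairwise.nil
      · exact List.Pairwise.cons (fun y hy => h1 a (by simp) y (by simpa using hy)) (by simpa using h2)
  | succ n ih =>
      intro l h
      exact ih _ (pvPassAt_good key n l h)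

theorem pvDispL_perm (l : List Char) : (pvDispL l).Perm l :=
  (pvBubble_perm _ _ _).trans (pvBubble_perm _ _ _)

theorem pvDispL_sorted (l : List Char) :
    (pvDispL l).Pairwise (fun a b => pvCnt l b ≤ pvCnt l a) := by
  apply pvBubble_sorted
  have hlen : (pvBubble pvIdx (l.length - 1) l).length = l.length :=
    (pvBubble_perm _ _ _).length_eq
  constructor
  · intro x hx y hy
    rw [List.drop_eq_nil_of_le (by omega)] at hy
    simp at hy
  · rw [List.drop_eq_nil_of_le (by omega)]
    exact List.Pairwise.nil


theorem pvChkLoop_spec (t : List Char) :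
    ∀ rest : List Int,
      (pvChkLoop t rest = 9 ↔ ∀ i ∈ rest, pvCnt t (PySem.List.pyGetD t i ' ') = 2) ∧
        (pvChkLoop t rest = 9 ∨ pvChkLoop t rest = 0) := by
  intro rest
  induction rest with
  | nil => simp [pvChkLoop]
  | cons i rest ih =>
      rw [pvChkLoop]
      split_ifs with h
      · simp only [List.mem_cons]
        constructor
        · constructor
          · intro h9; omega
          · intro hall; exact absurd (hall i (Or.inl rfl)) h
        · exact Or.inr trivial
      · push Not at h
        simp only [List.mem_cons]
        constructor
        · rw [ih.1]
          constructor
          · intro hall i' hi'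
            rcases hi' with rfl | hi'
            · exact h
            · exact hall i' hi'
          · intro hall
            exact fun i' hi' => hall i' (Or.inr hi')
        · exact ih.2

theorem pvLen8 (t : List Char) (h : t.length = 8) :
    ∃ a b c d e f g k, t = [a, b, c, d, e, f, g, k] := by
  rcases t with _|⟨a,_|⟨b,_|⟨c,_|⟨d,_|⟨e,_|⟨f,_|⟨g,_|⟨k,_|⟨x,r⟩⟩⟩⟩⟩⟩⟩⟩⟩ <;>
    first
      | exact ⟨a,b,c,d,e,f,g,k,rfl⟩
      | (exfalso; simp at h)

def pvP (s : List Char) : Prop :=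
  ∃ x y z : Char, x ≠ y ∧ x ≠ z ∧ y ≠ z ∧ s.Perm [x, x, x, x, y, y, z, z]

theorem pvLen3 (t : List Char) (h : t.length = 3) : ∃ a b c, t = [a, b, c] := by
  rcases t with _|⟨a,_|⟨b,_|⟨c,_|⟨d,r⟩⟩⟩⟩ <;> first | exact ⟨a,b,c,rfl⟩ | (exfalso; simp at h)

theorem pvB_iff (s : List Char) (hlen : s.length = 8) :
    (PySem.List.sorted (PySem.Dict.counter s).values (fun v => v) false = [2, 2, 4]
      ↔ pvP s) := by
  have hvals : (PySem.Dict.counter s).values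
      = (PySem.Set.ofList s : List Char).map (fun k => (List.count k s : Int)) := by
    simp [PySem.Dict.values, PySem.Dict.items_counter, List.map_map]
  constructor
  · intro hsorted
    have hperm : ((PySem.Set.ofList s : List Char).map (fun k => (List.count k s : Int))).Perm
        [2, 2, 4] := by
      rw [← hvals, ← hsorted]
      exact (PySem.List.sorted_perm _ _ _).symm
    have hlen3 : (PySem.Set.ofList s : List Char).length = 3 := by
      have := hperm.length_eq; simpa using this
    obtain ⟨c1, c2, c3, he⟩ := pvLen3 _ hlen3
    rw [he] at hperm
    have hnd : List.Nodup [c1, c2, c3] := he ▸ PySem.Set.nodup_ofList s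
    have h12 : c1 ≠ c2 := by intro h; rw [h] at hnd; simp at hnd
    have h13 : c1 ≠ c3 := by intro h; rw [h] at hnd; simp at hnd
    have h23 : c2 ≠ c3 := by intro h; rw [h] at hnd; simp at hnd
    have hmemS : ∀ a, a ∈ s ↔ (a = c1 ∨ a = c2 ∨ a = c3) := by
      intro a
      rw [← PySem.Set.mem_ofList (xs := s), he]; simp
    simp only [List.map_cons, List.map_nil] at hperm
    have hm1 : ((List.count c1 s : Int) = 2 ∨ (List.count c1 s : Int) = 4) := by
      have := hperm.mem_iff (a := (List.count c1 s : Int))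
      simp at this; tauto
    have hm2 : ((List.count c2 s : Int) = 2 ∨ (List.count c2 s : Int) = 4) := by
      have := hperm.mem_iff (a := (List.count c2 s : Int))
      simp at this; tauto
    have hm3 : ((List.count c3 s : Int) = 2 ∨ (List.count c3 s : Int) = 4) := by
      have := hperm.mem_iff (a := (List.count c3 s : Int))
      simp at this; tauto
    have hcnt4 : List.count (4 : Int) [(List.count c1 s : Int), (List.count c2 s : Int),
        (List.count c3 s : Int)] = 1 := by
      rw [List.perm_iff_count] at hperm
      have := hperm 4
      simpa using this
    have key : ∀ x y z : Char, x ≠ y → x ≠ z → y ≠ z →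
        (∀ a, a ∈ s ↔ (a = x ∨ a = y ∨ a = z)) →
        List.count x s = 4 → List.count y s = 2 → List.count z s = 2 → pvP s := by
      intro x y z hxy hxz hyz hmem hx hy hz
      refine ⟨x, y, z, hxy, hxz, hyz, ?_⟩
      rw [List.perm_iff_count]
      intro a
      by_cases hax : a = x
      · subst hax; simp [List.count_cons, hxy, hxz, hyz, Ne.symm hxy, Ne.symm hxz, Ne.symm hyz, hx]
      · by_cases hay : a = y
        · subst hay
          simp [List.count_cons, hxy, hxz, hyz, Ne.symm hxy, Ne.symm hxz, Ne.symm hyz, hy]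
        · by_cases haz : a = z
          · subst haz
            simp [List.count_cons, hxy, hxz, hyz, Ne.symm hxy, Ne.symm hxz, Ne.symm hyz, hz]
          · have : a ∉ s := fun hmem' => by
              rcases (hmem a).1 hmem' with rfl | rfl | rfl <;> simp_all
            rw [List.count_eq_zero.2 this]
            simp [List.count_cons, hax, hay, haz, Ne.symm hax, Ne.symm hay, Ne.symm haz]
    rcases hm1 with h1 | h1 <;> rcases hm2 with h2 | h2 <;> rcases hm3 with h3 | h3 <;>
      rw [h1, h2, h3] at hcnt4 <;> simp [List.count_cons] at hcnt4
    · exact key c3 c1 c2 (Ne.symm h13) (Ne.symm h23) h12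
        (by intro a; rw [hmemS a]; tauto)
        (by exact_mod_cast h3) (by exact_mod_cast h1) (by exact_mod_cast h2)
    · exact key c2 c1 c3 (Ne.symm h12) h23 h13
        (by intro a; rw [hmemS a]; tauto)
        (by exact_mod_cast h2) (by exact_mod_cast h1) (by exact_mod_cast h3)
    · exact key c1 c2 c3 h12 h13 h23 hmemS
        (by exact_mod_cast h1) (by exact_mod_cast h2) (by exact_mod_cast h3)
  · rintro ⟨x, y, z, hxy, hxz, hyz, hp⟩
    have cx : List.count x s = 4 := by
      rw [hp.count_eq]
      simp [List.count_cons, hxy, hxz, hyz, Ne.symm hxy, Ne.symm hxz, Ne.symm hyz]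
    have cy : List.count y s = 2 := by
      rw [hp.count_eq]
      simp [List.count_cons, hxy, hxz, hyz, Ne.symm hxy, Ne.symm hxz, Ne.symm hyz]
    have cz : List.count z s = 2 := by
      rw [hp.count_eq]
      simp [List.count_cons, hxy, hxz, hyz, Ne.symm hxy, Ne.symm hxz, Ne.symm hyz]
    have hofp : (PySem.Set.ofList s : List Char).Perm [x, y, z] := by
      rw [List.perm_ext_iff_of_nodup (PySem.Set.nodup_ofList s) (by simp [hxy, hxz, hyz])]
      intro a
      rw [PySem.Set.mem_ofList, hp.mem_iff]
      simp
    have hvperm : (PySem.Dict.counter s).values.Perm [4, 2, 2] := by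
      rw [hvals]
      have := hofp.map (fun k => (List.count k s : Int))
      simpa [cx, cy, cz] using this
    exact PySem.List.sorted_id_eq_of_perm_of_pairwise _ _
      ((hvperm.trans (by decide)).symm) (by decide)


theorem pvA_iff (s t : List Char) (hperm : t.Perm s) (hlen : s.length = 8)
    (hsort : t.Pairwise (fun a b => pvCnt s b ≤ pvCnt s a)) :
    ((pvCnt t (PySem.List.pyGetD t 0 ' ') = 4 ∧
        ∀ i ∈ [(4 : Int), 5, 6, 7], pvCnt t (PySem.List.pyGetD t i ' ') = 2) ↔ pvP s) := by
  have ht8 : t.length = 8 := hperm.length_eq.trans hlen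
  obtain ⟨a0, a1, a2, a3, a4, a5, a6, a7, rfl⟩ := pvLen8 t ht8
  have g0 : PySem.List.pyGetD [a0, a1, a2, a3, a4, a5, a6, a7] 0 ' ' = a0 := by simp only [pysem]; norm_num [List.getD_cons_zero, List.getD_cons_succ]
  have g4 : PySem.List.pyGetD [a0, a1, a2, a3, a4, a5, a6, a7] 4 ' ' = a4 := by simp only [pysem]; norm_num [List.getD_cons_zero, List.getD_cons_succ]
  have g5 : PySem.List.pyGetD [a0, a1, a2, a3, a4, a5, a6, a7] 5 ' ' = a5 := by simp only [pysem]; norm_num [List.getD_cons_zero, List.getD_cons_succ]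
  have g6 : PySem.List.pyGetD [a0, a1, a2, a3, a4, a5, a6, a7] 6 ' ' = a6 := by simp only [pysem]; norm_num [List.getD_cons_zero, List.getD_cons_succ]
  have g7 : PySem.List.pyGetD [a0, a1, a2, a3, a4, a5, a6, a7] 7 ' ' = a7 := by simp only [pysem]; norm_num [List.getD_cons_zero, List.getD_cons_succ]
  constructor
  · rintro ⟨h0, hrest⟩
    have c0 : List.count a0 [a0, a1, a2, a3, a4, a5, a6, a7] = 4 := by
      rw [g0] at h0; simp only [pvCnt] at h0; exact_mod_cast h0
    have c4 : List.count a4 [a0, a1, a2, a3, a4, a5, a6, a7] = 2 := by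
      have h := hrest 4 (by simp); rw [g4] at h; simp only [pvCnt] at h; exact_mod_cast h
    have c5 : List.count a5 [a0, a1, a2, a3, a4, a5, a6, a7] = 2 := by
      have h := hrest 5 (by simp); rw [g5] at h; simp only [pvCnt] at h; exact_mod_cast h
    have c6 : List.count a6 [a0, a1, a2, a3, a4, a5, a6, a7] = 2 := by
      have h := hrest 6 (by simp); rw [g6] at h; simp only [pvCnt] at h; exact_mod_cast h
    have c7 : List.count a7 [a0, a1, a2, a3, a4, a5, a6, a7] = 2 := by
      have h := hrest 7 (by simp); rw [g7] at h; simp only [pvCnt] at h; exact_mod_cast h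
    clear h0 hrest g0 g4 g5 g6 g7
    have ne4 : a4 ≠ a0 := by rintro rfl; omega
    have ne5 : a5 ≠ a0 := by rintro rfl; omega
    have ne6 : a6 ≠ a0 := by rintro rfl; omega
    have ne7 : a7 ≠ a0 := by rintro rfl; omega
    have e1 : a1 = a0 := by
      by_contra hne
      simp [List.count_cons, ne4, ne5, ne6, ne7, hne] at c0
      all_goals split_ifs at c0 <;> omega
    subst a1
    have e2 : a2 = a0 := by
      by_contra hne
      simp [List.count_cons, ne4, ne5, ne6, ne7, hne] at c0
      all_goals split_ifs at c0 <;> omega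
    subst a2
    have e3 : a3 = a0 := by
      by_contra hne
      simp [List.count_cons, ne4, ne5, ne6, ne7, hne] at c0
      all_goals split_ifs at c0 <;> omega
    subst a3
    by_cases h54 : a5 = a4
    · subst a5
      have n64 : a6 ≠ a4 := by
        rintro rfl
        simp [List.count_cons, Ne.symm ne4] at c4
        all_goals split_ifs at c4 <;> omega
      have n74 : a7 ≠ a4 := by
        rintro rfl
        simp [List.count_cons, Ne.symm ne4] at c4
      have e76 : a7 = a6 := by
        by_contra hne
        simp [List.count_cons, Ne.symm ne6, Ne.symm n64, hne] at c6
      subst a7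
      exact ⟨a0, a4, a6, Ne.symm ne4, Ne.symm ne6, Ne.symm n64, hperm.symm⟩
    · by_cases h64 : a6 = a4
      · subst a6
        have n74 : a7 ≠ a4 := by
          rintro rfl
          simp [List.count_cons, Ne.symm ne4, h54] at c4
        have e75 : a7 = a5 := by
          by_contra hne
          simp [List.count_cons, Ne.symm ne5, h54, Ne.symm h54, hne] at c5
        subst a7
        refine ⟨a0, a4, a5, Ne.symm ne4, Ne.symm ne5, Ne.symm h54, ?_⟩
        refine hperm.symm.trans ?_
        exact .cons a0 (.cons a0 (.cons a0 (.cons a0 (.cons a4 (List.Perm.swap a4 a5 [a5])))))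
      · have e74 : a7 = a4 := by
          by_contra hne
          simp [List.count_cons, Ne.symm ne4, h54, Ne.symm h54, h64, Ne.symm (ne_comm.mp (fun h => h64 h.symm)), hne] at c4
        subst a7
        have e65 : a6 = a5 := by
          by_contra hne
          simp [List.count_cons, Ne.symm ne5, h54, Ne.symm h54, hne] at c5
        subst a6
        refine ⟨a0, a4, a5, Ne.symm ne4, Ne.symm ne5, Ne.symm h54, ?_⟩
        refine hperm.symm.trans ?_
        refine .cons a0 (.cons a0 (.cons a0 (.cons a0 (.cons a4 ?_))))
        exact ((List.Perm.swap a4 a5 []).cons a5).trans (List.Perm.swap a4 a5 [a5])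
  · rintro ⟨x, y, z, hxy, hxz, hyz, hp⟩
    have cx : List.count x s = 4 := by
      rw [hp.count_eq]
      simp [List.count_cons, hxy, hxz, hyz, Ne.symm hxy, Ne.symm hxz, Ne.symm hyz]
    have cy : List.count y s = 2 := by
      rw [hp.count_eq]
      simp [List.count_cons, hxy, hxz, hyz, Ne.symm hxy, Ne.symm hxz, Ne.symm hyz]
    have cz : List.count z s = 2 := by
      rw [hp.count_eq]
      simp [List.count_cons, hxy, hxz, hyz, Ne.symm hxy, Ne.symm hxz, Ne.symm hyz]
    have hmap : List.map (pvCnt s) [a0, a1, a2, a3, a4, a5, a6, a7]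
        = [4, 4, 4, 4, 2, 2, 2, 2] := by
      refine List.Perm.eq_of_pairwise (le := fun p q : Int => q ≤ p)
        (fun a b _ _ h1 h2 => le_antisymm h2 h1)
        (List.Pairwise.map _ (fun a b h => h) hsort)
        (by decide) ?_
      refine (hperm.map (pvCnt s)).trans ?_
      refine (hp.map (pvCnt s)).trans ?_
      exact List.Perm.of_eq (by simp [pvCnt, cx, cy, cz])
    simp only [List.map_cons, List.map_nil, List.cons.injEq, and_true] at hmap
    obtain ⟨m0, m1, m2, m3, m4, m5, m6, m7⟩ := hmap
    have hct : ∀ a : Char,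
        pvCnt [a0, a1, a2, a3, a4, a5, a6, a7] a = pvCnt s a := by
      intro a
      simp [pvCnt, hperm.count_eq]
    refine ⟨by rw [g0, hct a0]; exact m0, ?_⟩
    intro i hi
    rcases (by simpa using hi : i = 4 ∨ i = 5 ∨ i = 6 ∨ i = 7) with rfl | rfl | rfl | rfl
    · rw [g4, hct a4]; exact m4
    · rw [g5, hct a5]; exact m5
    · rw [g6, hct a6]; exact m6
    · rw [g7, hct a7]; exact m7


theorem pvRange48 : PySem.List.pyRange 4 (((8 : Nat) : Int)) 1 = [4, 5, 6, 7] := by decide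

theorem pvMain (s : List Char) :
    (if s.length ≠ 8 then (0 : Int)
     else
       if pvCnt (pvDispL s) (PySem.List.pyGetD (pvDispL s) 0 ' ') ≠ 4 then 0
       else pvChkLoop (pvDispL s) (PySem.List.pyRange 4 ((pvDispL s).length : Int) 1))
    = (if s.length ≠ 8 then (0 : Int)
       else
         if PySem.List.sorted
             (s.foldl (fun d c => d.modify c 0 (· + 1))
               (PySem.Dict.empty : PySem.Dict Char Int)).values (fun v => v) false = [2, 2, 4]
         then 9 else 0) := by
  rw [← PySem.Dict.counter_eq_foldl]
  by_cases h8 : s.length = 8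
  · have hperm : (pvDispL s).Perm s := pvDispL_perm s
    have hsort := pvDispL_sorted s
    have hA := pvA_iff s (pvDispL s) hperm h8 hsort
    have hB := pvB_iff s h8
    have hlen' : (pvDispL s).length = 8 := hperm.length_eq.trans h8
    rw [if_neg (by omega : ¬s.length ≠ 8), if_neg (by omega : ¬s.length ≠ 8), hlen', pvRange48]
    by_cases hP : pvP s
    · obtain ⟨hc0, hrest⟩ := hA.2 hP
      rw [if_neg (by simp [hc0]), if_pos (hB.2 hP)]
      exact ((pvChkLoop_spec (pvDispL s) [4, 5, 6, 7]).1).2 hrest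
    · rw [if_neg (fun hs => hP (hB.1 hs))]
      by_cases hc0 : pvCnt (pvDispL s) (PySem.List.pyGetD (pvDispL s) 0 ' ') = 4
      · rw [if_neg (by simp [hc0])]
        rcases (pvChkLoop_spec (pvDispL s) [4, 5, 6, 7]).2 with h9 | h0
        · exact absurd (hA.1 ⟨hc0, ((pvChkLoop_spec (pvDispL s) [4, 5, 6, 7]).1).1 h9⟩) hP
        · exact h0
      · rw [if_pos hc0]
  · rw [if_pos h8, if_pos h8]


-- ===== VERDICT (by name: the statement is the Claim_ definition above) =====
theorem checksidaidui_spec : Claim_equal_checksidaidui := by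
  unfold Claim_equal_checksidaidui
  intro stringF _ _
  unfold Spec_checksidaidui checksidaidui checksidaidui_alt
  exact pvMain stringF.toList
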